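-- pv_equiv track=rewrite | github.com/PatrikBujna/Bc | main.py | upravStriedaniaSkr
-- ===== SOURCE A (Python) =====
-- def urobSkratky(zostava, frekventovane):
--     meno = ""
--     skratene = []
--     for i in zostava:
--         x = i.split()
--         meno = str(x[0][0:1]) + ". "
--         x = x[1:]
--         for j in x:
--             meno += j + " "
--         skratene.append(meno[:-1])
--
--     for i in frekventovane:
--         count = 0
--         while (count < len(skratene)):
--             x = skratene[count].split()
--             if ''.join(i) == x[len(x) - 1]:
--                 skratene[count] = zostava[count]
--             count += 1
--
--     return skratene
--
-- def upravStriedaniaSkr(striedania, frekvetovane):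
--     mena = []
--     casy = []
--     count = 0
--
--     while (count < len(striedania)):
--         temp = striedania[count]
--         prvy = temp[:temp.find(" <")]
--         mena.append(prvy)
--
--         druhy = temp[temp.find(">") + 2:temp.find(" (")]
--         mena.append(druhy)
--
--         cas = str(temp[temp.find(" ("):temp.find(")")]).replace("'", ". ")
--         casy.append(cas)
--
--         count += 1
--
--     upravene = urobSkratky(mena, frekvetovane)
--
--     count = 0
--     i = 0
--     while (count < len(striedania)):
--         striedania[count] = upravene[i] + casy[count] + upravene[i+1] + ")"
--         count +=1
--         i+=2
--
--     return striedania
-- ===== SOURCE B (Python) =====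
-- def _skrat(name):
--     parts = name.split()
--     head = parts[0][:1] + ". "
--     return head + " ".join(parts[1:]) if len(parts) > 1 else head[:-1]
--
-- def upravStriedaniaSkr(striedania, frekvetovane):
--     freq = set(frekvetovane)
--
--     def finish(name):
--         short = _skrat(name)
--         return name if short.split()[-1] in freq else short
--
--     for k in range(len(striedania)):
--         temp = striedania[k]
--         prvy = temp[:temp.find(" <")]
--         druhy = temp[temp.find(">") + 2:temp.find(" (")]
--         cas = temp[temp.find(" ("):temp.find(")")].replace("'", ". ")
--         striedania[k] = finish(prvy) + cas + finish(druhy) + ")"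
--     return striedania
-- ===== Notes on version B (the rewrite author's own statement) =====
-- stated objective: faster
-- what changed: B replaces A's three intermediate lists (mena/casy/skratene) and the frequent-names phase that rescans and re-splits every abbreviated name once per frequent entry by a single pass over striedania with a precomputed set of frequent names and a per-name closed-form decision (keep the full name iff the abbreviation's last word is in the set).
-- outside the precondition, e.g. on upravStriedaniaSkr(["A (x'y) <2> Q R (7'1)"], []): A raises IndexError, B raises IndexError
import Mathlib
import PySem

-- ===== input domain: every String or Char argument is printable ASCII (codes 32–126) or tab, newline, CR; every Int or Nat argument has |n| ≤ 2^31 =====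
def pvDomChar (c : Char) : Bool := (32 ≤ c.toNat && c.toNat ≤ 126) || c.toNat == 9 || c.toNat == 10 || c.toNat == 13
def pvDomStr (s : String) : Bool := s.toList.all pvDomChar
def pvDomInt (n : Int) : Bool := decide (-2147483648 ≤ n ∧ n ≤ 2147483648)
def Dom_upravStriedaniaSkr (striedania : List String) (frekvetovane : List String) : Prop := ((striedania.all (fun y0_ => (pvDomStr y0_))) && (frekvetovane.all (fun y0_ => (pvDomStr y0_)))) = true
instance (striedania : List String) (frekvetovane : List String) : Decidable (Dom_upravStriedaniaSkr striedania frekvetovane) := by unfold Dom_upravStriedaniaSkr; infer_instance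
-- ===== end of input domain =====

-- B replaces A's three intermediate lists (mena/casy/skratene) and |frekventovane| rescans of all
-- names by one pass over `striedania` with a per-name closed-form abbreviation decision against a set.
-- Both A and B mutate `striedania` in place in the same way; the equivalence proved is about the return value.

-- ===== PORT A =====
-- body of A's first for-loop in urobSkratky: skratene.append(abbreviated i)
-- (x[0] raises IndexError in Python when the split is empty; Pre_ excludes those inputs, getD 0 is a placeholder there)
def urobSkratkyAbbrev (skratene : List (List Char)) (i : List Char) : List (List Char) :=
  let x := PySem.Chars.split₀ i
  let meno := PySem.List.slice (x.getD 0 []) (some 0) (some 1) ++ ['.', ' ']   -- str(x[0][0:1]) + ". "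
  let x := PySem.List.slice x (some 1) none                                    -- x = x[1:]
  let meno := x.foldl (fun meno j => meno ++ j ++ [' ']) meno                  -- meno += j + " "
  skratene ++ [PySem.List.slice meno none (some (-1))]                         -- skratene.append(meno[:-1])

def urobSkratky (zostava : List (List Char)) (frekventovane : List (List Char)) : List (List Char) :=
  let skratene := zostava.foldl urobSkratkyAbbrev []
  -- second loop: for i in frekventovane: while count < len(skratene): maybe restore skratene[count]
  -- (len(skratene) never changes inside the while, so the fixed pyRange is faithful; ''.join(i) = i for a string i)
  frekventovane.foldl (fun skratene i =>
    (PySem.List.pyRange 0 (skratene.length : Int) 1).foldl (fun skratene count =>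
      let x := PySem.Chars.split₀ (PySem.List.pyGetD skratene count [])
      if i == PySem.List.pyGetD x ((x.length : Int) - 1) [] then                -- x[len(x) - 1]
        PySem.List.pySetD skratene count (PySem.List.pyGetD zostava count [])
      else skratene) skratene) skratene

def upravStriedaniaSkr (striedania : List String) (frekvetovane : List String) : List String :=
  -- first while loop: reads striedania[count] for count = 0..len-1 in order = fold over the list
  let menaCasy := striedania.foldl (fun (acc : List (List Char) × List (List Char)) tempS =>
      let temp := tempS.toList
      let prvy := PySem.List.slice temp none (some (PySem.Chars.find temp [' ', '<']))
      let mena := acc.1 ++ [prvy]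
      let druhy := PySem.List.slice temp (some (PySem.Chars.find temp ['>'] + 2)) (some (PySem.Chars.find temp [' ', '(']))
      let mena := mena ++ [druhy]
      let cas := PySem.Chars.replace (PySem.List.slice temp (some (PySem.Chars.find temp [' ', '('])) (some (PySem.Chars.find temp [')']))) ['\''] ['.', ' ']
      (mena, acc.2 ++ [cas])) ([], [])
  let upravene := urobSkratky menaCasy.1 (frekvetovane.map String.toList)
  -- final while loop: striedania[count] = upravene[i] + casy[count] + upravene[i+1] + ")", i = 2*count
  (PySem.List.pyRange 0 (striedania.length : Int) 1).map (fun c =>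
      String.ofList (PySem.List.pyGetD upravene (2 * c) [] ++ PySem.List.pyGetD menaCasy.2 c []
        ++ PySem.List.pyGetD upravene (2 * c + 1) [] ++ [')']))

-- ===== PORT B =====
-- _skrat(name): abbreviate one name (parts[0] raises in Python on a whitespace-only name; excluded by Pre_)
def skratAlt (name : List Char) : List Char :=
  let parts := PySem.Chars.split₀ name
  let head := PySem.List.slice (parts.getD 0 []) (some 0) (some 1) ++ ['.', ' ']
  if parts.length > 1 then head ++ PySem.Chars.join [' '] (List.drop 1 parts)
  else PySem.List.slice head none (some (-1))

-- finish(name): keep the full name iff the abbreviation's last word is frequent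
def finishAlt (freq : PySem.Set (List Char)) (name : List Char) : List Char :=
  let short := skratAlt name
  if PySem.Set.contains freq (PySem.List.pyGetD (PySem.Chars.split₀ short) (-1) []) then name else short

def upravStriedaniaSkr_alt (striedania : List String) (frekvetovane : List String) : List String :=
  let freq := PySem.Set.ofList (frekvetovane.map String.toList)
  striedania.map (fun tempS =>
    let temp := tempS.toList
    let prvy := PySem.List.slice temp none (some (PySem.Chars.find temp [' ', '<']))
    let druhy := PySem.List.slice temp (some (PySem.Chars.find temp ['>'] + 2)) (some (PySem.Chars.find temp [' ', '(']))
    let cas := PySem.Chars.replace (PySem.List.slice temp (some (PySem.Chars.find temp [' ', '('])) (some (PySem.Chars.find temp [')']))) ['\''] ['.', ' ']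
    String.ofList (finishAlt freq prvy ++ cas ++ finishAlt freq druhy ++ [')']))

-- ===== PRECONDITION & SPEC =====
-- the two names an entry parses to (used only by Pre_)
def pvName1 (temp : List Char) : List Char :=
  PySem.List.slice temp none (some (PySem.Chars.find temp [' ', '<']))
def pvName2 (temp : List Char) : List Char :=
  PySem.List.slice temp (some (PySem.Chars.find temp ['>'] + 2)) (some (PySem.Chars.find temp [' ', '(']))

-- Python A raises IndexError (x[0] on an empty split) exactly when one of the two parsed names of
-- some entry is empty/whitespace-only; those inputs are excluded.
def Pre_upravStriedaniaSkr (striedania : List String) (frekvetovane : List String) : Prop :=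
  ∀ s ∈ striedania, PySem.Chars.split₀ (pvName1 s.toList) ≠ [] ∧ PySem.Chars.split₀ (pvName2 s.toList) ≠ []
instance (striedania : List String) (frekvetovane : List String) : Decidable (Pre_upravStriedaniaSkr striedania frekvetovane) := by unfold Pre_upravStriedaniaSkr; infer_instance

def pvWitness_upravStriedaniaSkr : List String × List String :=
  (["Jan Novak <13> Peter Stary Mly (12'30)", "Solo <1> Duo Tam (3'2)"], ["Novak", "S."])

def Spec_upravStriedaniaSkr (striedania : List String) (frekvetovane : List String) (out : List String) : Prop := out = upravStriedaniaSkr_alt striedania frekvetovane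
instance (striedania : List String) (frekvetovane : List String) (out : List String) : Decidable (Spec_upravStriedaniaSkr striedania frekvetovane out) := by unfold Spec_upravStriedaniaSkr; infer_instance

-- ===== CLAIM (what is proved, stated in full; the proofs are below) =====
def Claim_equal_upravStriedaniaSkr : Prop := ∀ (striedania : List String) (frekvetovane : List String), Dom_upravStriedaniaSkr striedania frekvetovane → Pre_upravStriedaniaSkr striedania frekvetovane → Spec_upravStriedaniaSkr striedania frekvetovane (upravStriedaniaSkr striedania frekvetovane)

-- ===== LEMMAS AND PROOFS =====

-- last word of the (re-split) current name, as A's restore test reads it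
def lwA (a : List Char) : List Char :=
  PySem.List.pyGetD (PySem.Chars.split₀ a) (((PySem.Chars.split₀ a).length : Int) - 1) []

-- per-name restore step of A's frequent-names pass
def gstep (z : List Char) (a : List Char) (i : List Char) : List Char :=
  if i == lwA a then z else a

-- the "time" part of one entry, as both ports parse it
def casOf (temp : List Char) : List Char :=
  PySem.Chars.replace (PySem.List.slice temp (some (PySem.Chars.find temp [' ', '('])) (some (PySem.Chars.find temp [')']))) ['\''] ['.', ' ']

lemma lwA_eq_neg_one (a : List Char) :
    lwA a = PySem.List.pyGetD (PySem.Chars.split₀ a) (-1) [] := by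
  unfold lwA
  cases h : PySem.Chars.split₀ a with
  | nil => rfl
  | cons b bs =>
    rw [PySem.List.pyGetD_neg_one _ _ (by simp)]
    have h1 : ((b :: bs).length : Int) - 1 = ((bs.length : Nat) : Int) := by simp
    rw [h1, PySem.List.pyGetD_natCast, List.getLast_eq_getElem]
    simp [List.getD_eq_getElem?_getD]
    rfl

lemma any_eq_set_contains (fs : List (List Char)) (w : List Char) :
    fs.any (fun i => i == w) = PySem.Set.contains (PySem.Set.ofList fs) w := by
  rw [Bool.eq_iff_iff]
  simp [PySem.Set.contains, PySem.Set.mem_ofList]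

-- A's per-name abbreviation (the first for-loop body) is B's _skrat
lemma foldl_space (l : List (List Char)) (hl : l ≠ []) :
    ∀ h : List Char, l.foldl (fun m j => m ++ j ++ [' ']) h = h ++ PySem.Chars.join [' '] l ++ [' '] := by
  induction l with
  | nil => simp at hl
  | cons p rest ih =>
    intro h
    cases rest with
    | nil => simp [PySem.Chars.join_singleton]
    | cons q r =>
      rw [List.foldl_cons, ih (by simp), PySem.Chars.join_cons_cons]
      simp

lemma abbrev_eq (sk : List (List Char)) (i : List Char) :
    urobSkratkyAbbrev sk i = sk ++ [skratAlt i] := by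
  unfold urobSkratkyAbbrev skratAlt
  simp only [PySem.List.slice_from_one]
  cases h : PySem.Chars.split₀ i with
  | nil => simp
  | cons p rest =>
    cases rest with
    | nil => simp
    | cons q r =>
      simp only [List.tail_cons, List.drop_one]
      rw [foldl_space _ (by simp), PySem.List.slice_to_neg_one]
      have hdl : ∀ (y : List Char), (y ++ [' ']).dropLast = y := fun y => List.dropLast_concat
      simp only [hdl]
      simp

lemma take_set_self {α : Type} (s : List α) (m : Nat) (v : α) : (s.set m v).take m = s.take m := by
  rw [List.take_set]
  exact List.set_eq_of_length_le (by simp)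

lemma foldl_range_set {α : Type} (z : List α) (c : α → Bool) (d : α) :
    ∀ (n m : Nat) (s : List α), s.length = z.length → s.length - m = n →
    (List.range' m n).foldl (fun s j => if c (s.getD j d) then s.set j (z.getD j d) else s) s
    = s.take m ++ (List.zipWith (fun zk a => if c a then zk else a) z s).drop m := by
  intro n
  induction n with
  | zero =>
    intro m s hlen hm
    have h1 : s.length ≤ m := by omega
    have h2 : (List.zipWith (fun zk a => if c a then zk else a) z s).length ≤ m := by
      simp; omega
    simp [List.take_of_length_le h1, List.drop_of_length_le h2]
  | succ n ih =>
    intro m s hlen hm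
    have hmlt : m < s.length := by omega
    have hmz : m < z.length := by omega
    rw [List.range'_succ, List.foldl_cons]
    have hget : s.getD m d = s[m] := List.getD_eq_getElem s d hmlt
    have hz : z.getD m d = z[m] := List.getD_eq_getElem z d hmz
    set s' := if c (s.getD m d) then s.set m (z.getD m d) else s with hs'
    have hlen' : s'.length = s.length := by rw [hs']; split <;> simp
    have hdrop : s'.drop (m+1) = s.drop (m+1) := by
      rw [hs']; split
      · exact List.drop_set_of_lt (by omega)
      · rfl
    have htake : s'.take (m+1) = s.take m ++ [if c s[m] then z[m] else s[m]] := by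
      rw [hs', hget, hz]
      by_cases hc : c s[m]
      · rw [if_pos hc, if_pos hc, List.take_add_one,
            List.getElem?_set_self (by omega), take_set_self]
        rfl
      · rw [if_neg hc, if_neg hc, List.take_add_one, List.getElem?_eq_getElem hmlt]
        rfl
    rw [ih (m+1) s' (by omega) (by omega), htake]
    have hzip : (List.zipWith (fun zk a => if c a then zk else a) z s').drop (m+1)
        = (List.zipWith (fun zk a => if c a then zk else a) z s).drop (m+1) := by
      rw [List.drop_zipWith, List.drop_zipWith, hdrop]
    rw [hzip]
    have hdm : (List.zipWith (fun zk a => if c a then zk else a) z s).drop m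
        = (if c s[m] then z[m] else s[m]) :: (List.zipWith (fun zk a => if c a then zk else a) z s).drop (m+1) := by
      rw [List.drop_eq_getElem_cons (by simp; omega)]
      congr 1
      exact List.getElem_zipWith
    rw [hdm]
    simp

-- one pass of A's frequent loop acts pointwise
lemma pass_pointwise (i : List Char) (z s : List (List Char)) (h : s.length = z.length) :
    (PySem.List.pyRange 0 (s.length : Int) 1).foldl (fun sk count =>
      let x := PySem.Chars.split₀ (PySem.List.pyGetD sk count [])
      if i == PySem.List.pyGetD x ((x.length : Int) - 1) [] then
        PySem.List.pySetD sk count (PySem.List.pyGetD z count [])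
      else sk) s
    = List.zipWith (fun zk a => gstep zk a i) z s := by
  rw [PySem.List.pyRange_zero_nat, List.foldl_map]
  simp only [PySem.List.pyGetD_natCast, PySem.List.pySetD_natCast]
  have key := foldl_range_set z (fun a => i == lwA a) [] s.length 0 s h (by omega)
  rw [List.range_eq_range']
  simp only [List.take_zero, List.drop_zero, List.nil_append] at key
  rw [show (fun (sk : List (List Char)) (k : Nat) =>
        let x := PySem.Chars.split₀ (sk.getD k [])
        if i == PySem.List.pyGetD x ((x.length : Int) - 1) [] then sk.set k (z.getD k []) else sk)
      = (fun (sk : List (List Char)) (k : Nat) =>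
        if (fun a => i == lwA a) (sk.getD k []) then sk.set k (z.getD k []) else sk) from rfl]
  rw [key]
  rfl

lemma zipWith_snd {α : Type} : ∀ (z s : List α), s.length = z.length →
    List.zipWith (fun _ a => a) z s = s := by
  intro z
  induction z with
  | nil => intro s h; simp [List.length_eq_zero_iff.mp h]
  | cons a z ih =>
    intro s h
    cases s with
    | nil => simp
    | cons b s => simp [ih s (by simpa using h)]

lemma zip_fuse {α : Type} (h k : α → α → α) :
    ∀ (z s : List α), List.zipWith h z (List.zipWith k z s) = List.zipWith (fun zk a => h zk (k zk a)) z s := by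
  intro z
  induction z with
  | nil => intro s; simp
  | cons a z ih => intro s; cases s <;> simp [ih]

-- A's whole frequent-names phase, pointwise
lemma freq_fold (z : List (List Char)) :
    ∀ (fs : List (List Char)) (s : List (List Char)), s.length = z.length →
    fs.foldl (fun skratene i =>
      (PySem.List.pyRange 0 (skratene.length : Int) 1).foldl (fun skratene count =>
        let x := PySem.Chars.split₀ (PySem.List.pyGetD skratene count [])
        if i == PySem.List.pyGetD x ((x.length : Int) - 1) [] then
          PySem.List.pySetD skratene count (PySem.List.pyGetD z count [])
        else skratene) skratene) s
    = List.zipWith (fun zk a => fs.foldl (gstep zk) a) z s := by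
  intro fs
  induction fs with
  | nil =>
    intro s h
    simp only [List.foldl_nil]
    exact (zipWith_snd z s h).symm
  | cons f fs ih =>
    intro s h
    rw [List.foldl_cons, pass_pointwise f z s h,
        ih _ (by simp [h]), zip_fuse]
    rfl

lemma gstep_self (z : List Char) (i : List Char) : gstep z z i = z := by
  unfold gstep; split <;> rfl

lemma foldl_gstep_self (z : List Char) (fs : List (List Char)) :
    fs.foldl (gstep z) z = z := by
  induction fs with
  | nil => rfl
  | cons f fs ih => rw [List.foldl_cons, gstep_self]; exact ih

-- closed form of the per-name fold: restored iff the abbreviation's last word occurs in fs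
lemma elem_fold (z a0 : List Char) (fs : List (List Char)) :
    fs.foldl (gstep z) a0 = if fs.any (fun i => i == lwA a0) then z else a0 := by
  induction fs with
  | nil => simp
  | cons f fs ih =>
    rw [List.foldl_cons]
    by_cases h : (f == lwA a0) = true
    · rw [show gstep z a0 f = z from by unfold gstep; rw [if_pos h], foldl_gstep_self]
      simp [h]
    · rw [show gstep z a0 f = a0 from by unfold gstep; rw [if_neg h], ih]
      simp [h]

-- urobSkratky is a map of B's per-name decision
lemma urobSkratky_eq (z fs : List (List Char)) :
    urobSkratky z fs = z.map (fun n => finishAlt (PySem.Set.ofList fs) n) := by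
  have h1 : z.foldl urobSkratkyAbbrev [] = z.map skratAlt := by
    rw [List.foldl_ext _ (fun acc n => acc ++ [skratAlt n]) [] (fun acc n _ => abbrev_eq acc n),
        PySem.List.foldl_append_singleton_eq_map, List.nil_append]
  unfold urobSkratky
  dsimp only []
  rw [h1,
      freq_fold z fs (z.map skratAlt) (by simp),
      List.zipWith_map_right, List.zipWith_self]
  apply List.map_congr_left
  intro n _
  rw [elem_fold]
  unfold finishAlt
  rw [any_eq_set_contains, lwA_eq_neg_one]

-- A's first while loop, in closed form
lemma menaCasy_eq (l : List String) :
    ∀ m c : List (List Char),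
    l.foldl (fun (acc : List (List Char) × List (List Char)) tempS =>
      let temp := tempS.toList
      let prvy := PySem.List.slice temp none (some (PySem.Chars.find temp [' ', '<']))
      let mena := acc.1 ++ [prvy]
      let druhy := PySem.List.slice temp (some (PySem.Chars.find temp ['>'] + 2)) (some (PySem.Chars.find temp [' ', '(']))
      let mena := mena ++ [druhy]
      let cas := PySem.Chars.replace (PySem.List.slice temp (some (PySem.Chars.find temp [' ', '('])) (some (PySem.Chars.find temp [')']))) ['\''] ['.', ' ']
      (mena, acc.2 ++ [cas])) (m, c)
    = (m ++ l.flatMap (fun t => [pvName1 t.toList, pvName2 t.toList]), c ++ l.map (fun t => casOf t.toList)) := by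
  induction l with
  | nil => intro m c; simp
  | cons t l ih =>
    intro m c
    rw [List.foldl_cons, ih]
    simp [pvName1, pvName2, casOf]

lemma flatMap_pair_getD_even {σ α : Type} (f g : σ → α) (d : α) :
    ∀ (l : List σ) (k : Nat) (h : k < l.length),
    (l.flatMap (fun t => [f t, g t])).getD (2 * k) d = f (l[k]'h) := by
  intro l
  induction l with
  | nil => intro k h; simp at h
  | cons t ts ih =>
    intro k h
    cases k with
    | zero => simp
    | succ k =>
      have h2 : 2 * (k+1) = (2*k) + 1 + 1 := by ring
      simp only [List.flatMap_cons, h2]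
      simpa using ih k (by simpa using h)

lemma flatMap_pair_getD_odd {σ α : Type} (f g : σ → α) (d : α) :
    ∀ (l : List σ) (k : Nat) (h : k < l.length),
    (l.flatMap (fun t => [f t, g t])).getD (2 * k + 1) d = g (l[k]'h) := by
  intro l
  induction l with
  | nil => intro k h; simp at h
  | cons t ts ih =>
    intro k h
    cases k with
    | zero => simp
    | succ k =>
      have h2 : 2 * (k+1) + 1 = (2*k + 1) + 1 + 1 := by ring
      simp only [List.flatMap_cons, h2]
      simpa using ih k (by simpa using h)

-- ===== VERDICT (by name: the statement is the Claim_ definition above) =====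
theorem upravStriedaniaSkr_spec : Claim_equal_upravStriedaniaSkr := by
  intro striedania frekvetovane _hdom _hpre
  unfold Spec_upravStriedaniaSkr upravStriedaniaSkr upravStriedaniaSkr_alt
  rw [menaCasy_eq striedania [] []]
  simp only [List.nil_append]
  rw [urobSkratky_eq]
  rw [PySem.List.pyRange_zero_nat, List.map_map, List.map_flatMap]
  apply List.ext_getElem (by simp)
  intro k hk1 hk2
  simp only [List.getElem_map, List.getElem_range, Function.comp_apply]
  have hk : k < striedania.length := by simpa using hk1
  have c1 : (2 : Int) * (k : Int) = ((2 * k : Nat) : Int) := by push_cast; ring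
  have c2 : (2 : Int) * (k : Int) + 1 = ((2 * k + 1 : Nat) : Int) := by push_cast; ring
  simp only [List.map_cons, List.map_nil]
  rw [c2, c1, PySem.List.pyGetD_natCast, PySem.List.pyGetD_natCast, PySem.List.pyGetD_natCast,
      flatMap_pair_getD_even _ _ _ _ _ hk, flatMap_pair_getD_odd _ _ _ _ _ hk,
      List.getD_eq_getElem _ _ (by simpa using hk), List.getElem_map]
  rfl
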